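-- pv_equiv track=rewrite | github.com/zktm9903/DNA_project | main.py | parseDnaValue
-- ===== SOURCE A (Python) =====
-- def parseDnaValue(fileData):
--   regionNamesArr = []
--   nucleotidesArr = []
--
--   for i in range(len(fileData)):
--     if i % 2 == 0:
--       regionNamesArr.append(fileData[i].strip())
--     else:
--       nucleotidesArr.append(fileData[i].strip().upper())
--
--   return regionNamesArr, nucleotidesArr
-- ===== SOURCE B (Python) =====
-- def parseDnaValue(fileData):
--   regionNamesArr = [x.strip() for x in fileData[::2]]
--   nucleotidesArr = [x.strip().upper() for x in fileData[1::2]]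
--   return regionNamesArr, nucleotidesArr
-- ===== Notes on version B (the rewrite author's own statement) =====
-- stated objective: idiomatic
-- what changed: Replaces the index-parity loop with two strided slices (fileData[::2], fileData[1::2]) mapped by comprehensions, eliminating the i%2 branch and indexing.
import Mathlib
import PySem

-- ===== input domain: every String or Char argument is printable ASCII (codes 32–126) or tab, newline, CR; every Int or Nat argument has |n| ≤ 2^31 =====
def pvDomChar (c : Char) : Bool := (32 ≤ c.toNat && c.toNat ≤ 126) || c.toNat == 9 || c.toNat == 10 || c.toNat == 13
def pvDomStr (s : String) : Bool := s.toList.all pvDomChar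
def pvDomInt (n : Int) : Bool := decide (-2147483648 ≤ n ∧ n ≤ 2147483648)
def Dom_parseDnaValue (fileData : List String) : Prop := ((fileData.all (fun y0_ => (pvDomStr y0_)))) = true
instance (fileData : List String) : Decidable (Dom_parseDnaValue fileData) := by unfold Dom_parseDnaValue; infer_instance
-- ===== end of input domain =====

-- B replaces the index-parity loop with two strided slices mapped by comprehensions (idiomatic; same cost).

-- ===== PORT A =====
def parseDnaValue (fileData : List String) : List String × List String :=
  (PySem.List.pyRange 0 (fileData.length : Int) 1).foldl
    (fun acc i =>
      if PySem.Int.mod i 2 == 0 then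
        (acc.1 ++ [PySem.Str.strip (PySem.List.pyGetD fileData i "")], acc.2)
      else
        (acc.1, acc.2 ++ [PySem.Str.upper (PySem.Str.strip (PySem.List.pyGetD fileData i ""))]))
    ([], [])

-- ===== PORT B =====
def parseDnaValue_alt (fileData : List String) : List String × List String :=
  ( ((PySem.List.slice? fileData none none 2).getD []).map (fun x => PySem.Str.strip x),
    ((PySem.List.slice? fileData (some 1) none 2).getD []).map
      (fun x => PySem.Str.upper (PySem.Str.strip x)) )

-- ===== PRECONDITION & SPEC =====
def Spec_parseDnaValue (fileData : List String) (out : List String × List String) : Prop := out = parseDnaValue_alt fileData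
instance (fileData : List String) (out : List String × List String) : Decidable (Spec_parseDnaValue fileData out) := by unfold Spec_parseDnaValue; infer_instance

-- ===== CLAIM (what is proved, stated in full; the proofs are below) =====
def Claim_equal_parseDnaValue : Prop := ∀ (fileData : List String), Dom_parseDnaValue fileData → Spec_parseDnaValue fileData (parseDnaValue fileData)

-- ===== LEMMAS AND PROOFS =====

theorem evens_nil : PySem.List.slice? ([] : List String) none none 2 = some [] := by decide

theorem evens_one (a : String) : PySem.List.slice? [a] none none 2 = some [a] := by
  simp [PySem.List.slice?, PySem.List.sliceIndices]

theorem evens_cons (a b : String) (t : List String) :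
    PySem.List.slice? (a::b::t) none none 2 = (PySem.List.slice? t none none 2).map (a :: ·) := by
  simp [PySem.List.slice?, PySem.List.sliceIndices]
  have hC : (if (0:Int) ≤ (t.length:Int)+1 then (((t.length:Int)+1+1+2-1)/2).toNat else 0)
      = ((if 0 < t.length then (((t.length:Int)+2-1)/2).toNat else 0) + 1) := by
    split_ifs <;> omega
  rw [hC, List.range_succ_eq_map]
  simp only [List.filterMap_cons, List.filterMap_map, Nat.cast_zero, mul_zero, Int.toNat_zero,
    List.getElem?_cons_zero, Function.comp, Nat.succ_eq_add_one]
  refine congrArg _ (List.filterMap_congr ?_)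
  intro x _
  have h2 : (2*(((x:Nat)+1:Nat):Int)).toNat = 2*x+2 := by push_cast; omega
  have h3 : (2*(x:Int)).toNat = 2*x := by omega
  rw [h2, h3]
  simp

theorem odds_nil : PySem.List.slice? ([] : List String) (some 1) none 2 = some [] := by decide

theorem odds_one (a : String) : PySem.List.slice? [a] (some 1) none 2 = some [] := by
  simp [PySem.List.slice?, PySem.List.sliceIndices]

theorem odds_cons (a : String) (t : List String) :
    PySem.List.slice? (a::t) (some 1) none 2 = PySem.List.slice? t none none 2 := by
  simp [PySem.List.slice?, PySem.List.sliceIndices]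
  refine List.filterMap_congr ?_
  intro x _
  have h2 : (1 + 2*(x:Int)).toNat = 2*x+1 := by omega
  have h3 : (2*(x:Int)).toNat = 2*x := by omega
  rw [h2, h3]
  simp

theorem evensD_cons_odds (b : String) (t : List String) :
    (PySem.List.slice? (b::t) none none 2).getD [] = b :: (PySem.List.slice? t (some 1) none 2).getD [] := by
  cases t with
  | nil => simp [evens_one, odds_nil]
  | cons c t' =>
      obtain ⟨l, hl⟩ : ∃ l, PySem.List.slice? t' none none 2 = some l := ⟨_, rfl⟩
      simp [evens_cons, odds_cons, hl]

-- the loop body of A, on (index, element) pairs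
def pvStep (acc : List String × List String) (p : Int × String) : List String × List String :=
  if PySem.Int.mod p.1 2 == 0 then
    (acc.1 ++ [PySem.Str.strip p.2], acc.2)
  else
    (acc.1, acc.2 ++ [PySem.Str.upper (PySem.Str.strip p.2)])

theorem pvMain : ∀ (xs : List String) (s : Int), s % 2 = 0 → ∀ (acc : List String × List String),
    (PySem.List.enumerate xs s).foldl pvStep acc =
      (acc.1 ++ (parseDnaValue_alt xs).1, acc.2 ++ (parseDnaValue_alt xs).2)
  | [], s, hs, acc => by
      simp [PySem.List.enumerate_nil, parseDnaValue_alt, evens_nil, odds_nil]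
  | [a], s, hs, acc => by
      have h0 : s.fmod 2 = 0 := by rw [Int.fmod_eq_emod]; simp; omega
      simp [PySem.List.enumerate_cons, PySem.List.enumerate_nil, parseDnaValue_alt,
        evens_one, odds_one, pvStep, PySem.Int.mod, h0]
  | a::b::t, s, hs, acc => by
      have h0 : s.fmod 2 = 0 := by rw [Int.fmod_eq_emod]; simp; omega
      have h1 : ¬ (s+1).fmod 2 = 0 := by rw [Int.fmod_eq_emod]; simp; omega
      have ih := pvMain t (s + 2) (by omega)
      obtain ⟨l, hl⟩ : ∃ l, PySem.List.slice? t none none 2 = some l := ⟨_, rfl⟩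
      simp only [PySem.List.enumerate_cons, List.foldl_cons]
      rw [show s + 1 + 1 = s + 2 by ring, ih]
      simp [pvStep, PySem.Int.mod, h0, h1, parseDnaValue_alt, evens_cons, odds_cons, hl, evensD_cons_odds]

theorem pvA_eq_enum (xs : List String) :
    parseDnaValue xs = (PySem.List.enumerate xs 0).foldl pvStep ([], []) := by
  rw [PySem.List.enumerate_eq_map_pyRange (d := ""), List.foldl_map]
  rfl

-- ===== VERDICT (by name: the statement is the Claim_ definition above) =====
theorem parseDnaValue_spec : Claim_equal_parseDnaValue := by
  intro xs _
  unfold Spec_parseDnaValue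
  rw [pvA_eq_enum, pvMain xs 0 (by omega) ([], [])]
  simp
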